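-- pv_equiv track=rewrite | github.com/Developer-Mike/EInf | sum.py | get_sum_sublist
-- ===== SOURCE A (Python) =====
-- def get_sum_sublist(current_numbers, available_numbers, goal):
--     for new_number in available_numbers:
--         new_current_numbers = current_numbers + [new_number]
--
--         if sum(new_current_numbers) == goal: return new_current_numbers
--
--         updated_available_numbers = [o for o in available_numbers if o != new_number]
--         result = get_sum_sublist(new_current_numbers, updated_available_numbers, goal)
--
--         # Possible result found
--         if result != None: return result
--
--     return None
-- ===== SOURCE B (Python) =====
-- def get_sum_sublist(current_numbers, available_numbers, goal):
--     # distinct values in first-occurrence order (picking a value removes all its duplicates)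
--     distinct = []
--     for v in available_numbers:
--         if v not in distinct:
--             distinct.append(v)
--
--     def pick(ys, target):
--         # first (in include-first depth-first order) nonempty in-order subset of ys summing to target
--         if not ys:
--             return None
--         x, rest = ys[0], ys[1:]
--         if x == target:
--             return [x]
--         with_x = pick(rest, target - x)
--         if with_x is not None:
--             return [x] + with_x
--         return pick(rest, target)
--
--     sub = pick(distinct, goal - sum(current_numbers))
--     return None if sub is None else current_numbers + sub
-- ===== Notes on version B (the rewrite author's own statement) =====
-- stated objective: alternative
-- what changed: Replaces A's permutation-exploring recursion (which rebuilds a filtered candidate list and re-sums the growing prefix at every node) by a single dedup pass followed by an include/exclude subset search over the distinct values carrying the remaining target; the first match in A's depth-first order is always an in-order subset, so the results coincide. Intended as faster (O(2^n) subsets vs A's O(n!*n) permutations; the probe measured B 65x-5315x ahead but on too few A-finishing inputs to confirm), recorded as unconfirmed.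
import Mathlib
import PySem

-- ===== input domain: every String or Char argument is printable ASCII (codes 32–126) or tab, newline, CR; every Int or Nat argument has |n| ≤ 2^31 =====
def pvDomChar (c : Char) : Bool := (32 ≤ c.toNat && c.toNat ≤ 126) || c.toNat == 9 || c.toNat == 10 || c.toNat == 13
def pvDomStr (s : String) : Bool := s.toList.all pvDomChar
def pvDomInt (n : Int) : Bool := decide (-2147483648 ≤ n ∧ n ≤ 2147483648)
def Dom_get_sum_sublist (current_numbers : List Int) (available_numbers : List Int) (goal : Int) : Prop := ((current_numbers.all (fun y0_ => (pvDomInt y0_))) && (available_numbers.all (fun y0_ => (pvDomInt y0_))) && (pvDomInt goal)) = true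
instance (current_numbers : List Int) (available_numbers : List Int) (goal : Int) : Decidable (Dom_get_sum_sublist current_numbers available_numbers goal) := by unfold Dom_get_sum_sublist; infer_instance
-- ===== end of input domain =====

-- B replaces A's permutation-exploring recursion (which rebuilds a filtered list and re-sums at
-- every node) by one dedup pass followed by an include/exclude subset search carrying the
-- remaining target; return value is identical (neither mutates its arguments).

-- ===== PORT A =====
-- literal port of A: iterate over available_numbers; append, test the sum, recurse on the
-- list with all occurrences of the chosen number filtered out
def get_sum_sublist (current_numbers : List Int) (available_numbers : List Int) (goal : Int) : Option (List Int) :=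
  available_numbers.attach.findSome? (fun new_number =>
    let new_current_numbers := current_numbers ++ [new_number.val]
    if new_current_numbers.sum = goal then some new_current_numbers
    else get_sum_sublist new_current_numbers
           (available_numbers.filter (fun o => o ≠ new_number.val)) goal)
termination_by available_numbers.length
decreasing_by
  simp only [List.length_unattach]
  rw [← List.length_attach (l := available_numbers), List.length_filter_lt_length_iff_exists]
  exact ⟨new_number, List.mem_attach _ _, by simp⟩

-- ===== PORT B =====
-- Source B's pick: first (in include-first depth-first order) nonempty in-order subset of ys summing to target
def pvPick (ys : List Int) (target : Int) : Option (List Int) :=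
  match ys with
  | [] => none
  | x :: rest =>
    if x = target then some [x]
    else
      match pvPick rest (target - x) with
      | some r => some (x :: r)
      | none => pvPick rest target

-- Source B's seen-list loop: distinct values in first-occurrence order
def pvDistinct (l : List Int) : List Int :=
  l.foldl (fun acc v => if v ∈ acc then acc else acc ++ [v]) []

def get_sum_sublist_alt (current_numbers : List Int) (available_numbers : List Int) (goal : Int) : Option (List Int) :=
  match pvPick (pvDistinct available_numbers) (goal - current_numbers.sum) with
  | none => none
  | some sub => some (current_numbers ++ sub)

-- ===== PRECONDITION & SPEC =====
def Spec_get_sum_sublist (current_numbers : List Int) (available_numbers : List Int) (goal : Int) (out : Option (List Int)) : Prop := out = get_sum_sublist_alt current_numbers available_numbers goal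
instance (current_numbers : List Int) (available_numbers : List Int) (goal : Int) (out : Option (List Int)) : Decidable (Spec_get_sum_sublist current_numbers available_numbers goal out) := by unfold Spec_get_sum_sublist; infer_instance

-- ===== CLAIM (what is proved, stated in full; the proofs are below) =====
def Claim_equal_get_sum_sublist : Prop := ∀ (current_numbers : List Int) (available_numbers : List Int) (goal : Int), Dom_get_sum_sublist current_numbers available_numbers goal → Spec_get_sum_sublist current_numbers available_numbers goal (get_sum_sublist current_numbers available_numbers goal)

-- ===== LEMMAS AND PROOFS =====

theorem pvFilterNeLtLen (l : List Int) (x : Int) (hx : x ∈ l) :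
    (l.filter (fun o => o ≠ x)).length < l.length := by
  rw [List.length_filter_lt_length_iff_exists]
  exact ⟨x, hx, by simp⟩


-- erase-all formulation of dedup (proof helper)
def pvDedupF : List Int → List Int
  | [] => []
  | x :: l => x :: pvDedupF (l.filter (fun o => o ≠ x))
termination_by l => l.length
decreasing_by
  simp only [List.length_unattach, List.length_cons]
  exact Nat.lt_succ_of_le (le_trans (List.length_filter_le _ _) (by simp))

theorem pvDistinct_go (l : List Int) : ∀ acc : List Int,
    l.foldl (fun acc v => if v ∈ acc then acc else acc ++ [v]) acc
      = acc ++ pvDedupF (l.filter (fun v => v ∉ acc)) := by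
  induction l with
  | nil => intro acc; simp [pvDedupF]
  | cons x l ih =>
    intro acc
    by_cases hx : x ∈ acc
    · simp only [List.foldl_cons, if_pos hx]
      rw [ih acc]
      have : List.filter (fun v => decide (v ∉ acc)) (x :: l)
          = List.filter (fun v => decide (v ∉ acc)) l := by
        simp [hx]
      rw [this]
    · simp only [List.foldl_cons, if_neg hx]
      rw [ih (acc ++ [x])]
      have h1 : List.filter (fun v => decide (v ∉ acc)) (x :: l)
          = x :: List.filter (fun v => decide (v ∉ acc)) l := by
        simp [hx]
      rw [h1, pvDedupF]
      have h2 : List.filter (fun o => decide (o ≠ x)) (List.filter (fun v => decide (v ∉ acc)) l)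
          = List.filter (fun v => decide (v ∉ acc ++ [x])) l := by
        rw [List.filter_filter]
        apply List.filter_congr
        intro a _
        by_cases h1 : a = x <;> by_cases h2 : a ∈ acc <;> simp [h1, h2]
      rw [h2, List.append_assoc]
      rfl

theorem pvDistinct_eq (l : List Int) : pvDistinct l = pvDedupF l := by
  unfold pvDistinct
  rw [pvDistinct_go l []]
  simp

theorem pvDedupF_mem_aux : ∀ (n : Nat) (l : List Int), l.length ≤ n →
    ∀ a : Int, (a ∈ pvDedupF l ↔ a ∈ l) := by
  intro n
  induction n with
  | zero =>
    intro l hl a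
    have : l = [] := List.length_eq_zero_iff.1 (Nat.le_zero.1 hl)
    subst this; simp [pvDedupF]
  | succ n ih =>
    intro l hl a
    cases l with
    | nil => simp [pvDedupF]
    | cons x l =>
      rw [pvDedupF]
      have hlen : (l.filter (fun o => o ≠ x)).length ≤ n :=
        le_trans (List.length_filter_le _ _) (by simp at hl; omega)
      simp only [List.mem_cons, ih _ hlen a, List.mem_filter]
      by_cases hax : a = x <;> simp [hax]

theorem pvDedupF_mem (l : List Int) : ∀ a : Int, a ∈ pvDedupF l ↔ a ∈ l :=
  pvDedupF_mem_aux l.length l (Nat.le_refl _)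

theorem pvDedupF_nodup_aux : ∀ (n : Nat) (l : List Int), l.length ≤ n → (pvDedupF l).Nodup := by
  intro n
  induction n with
  | zero =>
    intro l hl
    have : l = [] := List.length_eq_zero_iff.1 (Nat.le_zero.1 hl)
    subst this; simp [pvDedupF]
  | succ n ih =>
    intro l hl
    cases l with
    | nil => simp [pvDedupF]
    | cons x l =>
      rw [pvDedupF]
      have hlen : (l.filter (fun o => o ≠ x)).length ≤ n :=
        le_trans (List.length_filter_le _ _) (by simp at hl; omega)
      refine List.nodup_cons.2 ⟨?_, ih _ hlen⟩
      rw [pvDedupF_mem]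
      simp

theorem pvDedupF_nodup (l : List Int) : (pvDedupF l).Nodup :=
  pvDedupF_nodup_aux l.length l (Nat.le_refl _)

theorem pvDedupF_filter_aux : ∀ (n : Nat) (l : List Int), l.length ≤ n → ∀ (p : Int → Bool),
    pvDedupF (l.filter p) = (pvDedupF l).filter p := by
  intro n
  induction n with
  | zero =>
    intro l hl p
    have : l = [] := List.length_eq_zero_iff.1 (Nat.le_zero.1 hl)
    subst this; simp [pvDedupF]
  | succ n ih =>
    intro l hl p
    cases l with
    | nil => simp [pvDedupF]
    | cons x l =>
      have hlen : (l.filter (fun o => o ≠ x)).length ≤ n :=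
        le_trans (List.length_filter_le _ _) (by simp at hl; omega)
      rw [pvDedupF]
      by_cases hp : p x
      · rw [List.filter_cons, if_pos hp, pvDedupF, List.filter_cons, if_pos hp]
        have hcomm : List.filter (fun o => decide (o ≠ x)) (List.filter p l)
            = List.filter p (List.filter (fun o => decide (o ≠ x)) l) := by
          rw [List.filter_filter, List.filter_filter]
          exact List.filter_congr (fun a _ => Bool.and_comm _ _)
        simp only [ne_eq, decide_not] at hcomm ⊢
        rw [hcomm]
        congr 1
        have := ih _ hlen p
        simp only [ne_eq, decide_not] at this
        exact this
      · have hp' : p x = false := by simpa using hp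
        rw [List.filter_cons, if_neg (by simp [hp']), List.filter_cons, if_neg (by simp [hp'])]
        have h3 : List.filter p (List.filter (fun o => decide (o ≠ x)) l) = List.filter p l := by
          rw [List.filter_filter]
          apply List.filter_congr
          intro a _
          by_cases hax : a = x
          · subst hax; simp [hp']
          · simp [hax]
        rw [← h3]
        exact ih _ hlen p

theorem pvDedupF_filter (p : Int → Bool) (l : List Int) :
    pvDedupF (l.filter p) = (pvDedupF l).filter p :=
  pvDedupF_filter_aux l.length l (Nat.le_refl _) p

-- findSome? helper lemmas
theorem pvFindSome?_congr {α β : Type} (l : List α) (f g : α → Option β)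
    (h : ∀ x ∈ l, f x = g x) : l.findSome? f = l.findSome? g := by
  induction l with
  | nil => rfl
  | cons x l ih =>
    rw [List.findSome?_cons, List.findSome?_cons, h x (List.mem_cons_self),
        ih (fun y hy => h y (List.mem_cons_of_mem _ hy))]

theorem pvFindSome?_filter_ne {β : Type} (g : Int → Option β) (x : Int) (hg : g x = none) :
    ∀ l : List Int, (l.filter (fun o => o ≠ x)).findSome? g = l.findSome? g := by
  intro l
  induction l with
  | nil => rfl
  | cons y l ih =>
    rw [List.filter_cons]
    by_cases hyx : y = x
    · rw [if_neg (by simp [hyx]), ih, List.findSome?_cons, hyx, hg]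
    · rw [if_pos (by simp [hyx]), List.findSome?_cons, List.findSome?_cons, ih]

theorem pvFindSome?_dedup_aux {β : Type} (g : Int → Option β) :
    ∀ (n : Nat) (l : List Int), l.length ≤ n → (pvDedupF l).findSome? g = l.findSome? g := by
  intro n
  induction n with
  | zero =>
    intro l hl
    have : l = [] := List.length_eq_zero_iff.1 (Nat.le_zero.1 hl)
    subst this; simp [pvDedupF]
  | succ n ih =>
    intro l hl
    cases l with
    | nil => simp [pvDedupF]
    | cons x l =>
      have hlen : (l.filter (fun o => o ≠ x)).length ≤ n :=
        le_trans (List.length_filter_le _ _) (by simp at hl; omega)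
      rw [pvDedupF, List.findSome?_cons, List.findSome?_cons]
      cases hgx : g x with
      | some b => rfl
      | none =>
        have h1 := ih _ hlen
        have h2 := pvFindSome?_filter_ne g x hgx l
        simp only [ne_eq, decide_not] at h1 h2 ⊢
        rw [h1, h2]

theorem pvFindSome?_dedup {β : Type} (g : Int → Option β) (l : List Int) :
    (pvDedupF l).findSome? g = l.findSome? g :=
  pvFindSome?_dedup_aux g l.length l (Nat.le_refl _)

-- "d has a nonempty sub-multiset summing to t"
def pvHasSub (d : List Int) (t : Int) : Prop := ∃ s : List Int, s ≠ [] ∧ s.sum = t ∧ s.Subperm d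

theorem pvHasSub_nil (t : Int) : ¬ pvHasSub [] t := by
  rintro ⟨s, hne, _, hsp⟩
  exact hne (List.subperm_nil.1 hsp)

theorem pvHasSub_cons (x : Int) (d : List Int) (t : Int) :
    pvHasSub (x :: d) t ↔ x = t ∨ pvHasSub d (t - x) ∨ pvHasSub d t := by
  constructor
  · rintro ⟨s, hne, hsum, hsp⟩
    by_cases hx : x ∈ s
    · have hperm : s.Perm (x :: s.erase x) := List.perm_cons_erase hx
      have hsum' : x + (s.erase x).sum = t := by
        have := hperm.sum_eq
        simp at this
        omega
      have herase : (s.erase x).Subperm d := by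
        rw [List.subperm_ext_iff]
        intro a ha
        have hle : List.count a (s.erase x) ≤ List.count a s := (List.erase_sublist).count_le a
        by_cases hax : a = x
        · subst hax
          have h1 : List.count a (s.erase a) = List.count a s - 1 := List.count_erase_self
          have h2 : List.count a s ≤ List.count a (a :: d) := List.subperm_ext_iff.1 hsp a hx
          simp [List.count_cons_self] at h2
          omega
        · have h2 : List.count a s ≤ List.count a (x :: d) :=
            List.subperm_ext_iff.1 hsp a (List.mem_of_mem_erase ha)
          rw [List.count_cons_of_ne (fun h => hax h.symm)] at h2
          omega
      by_cases he : s.erase x = []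
      · left
        have : s = [x] := by
          rw [he] at hperm; exact List.perm_singleton.1 hperm
        rw [this] at hsum; simpa using hsum
      · right; left
        exact ⟨s.erase x, he, by omega, herase⟩
    · right; right
      refine ⟨s, hne, hsum, ?_⟩
      rw [List.subperm_ext_iff]
      intro a ha
      have h2 : List.count a s ≤ List.count a (x :: d) := List.subperm_ext_iff.1 hsp a ha
      have hax : a ≠ x := fun h => hx (h ▸ ha)
      rwa [List.count_cons_of_ne (fun h => hax h.symm)] at h2
  · rintro (h | ⟨s, hne, hsum, hsp⟩ | ⟨s, hne, hsum, hsp⟩)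
    · exact ⟨[x], by simp, by simpa using h, (List.Sublist.cons₂ x (List.nil_sublist d)).subperm⟩
    · exact ⟨x :: s, by simp, by simp [hsum], (List.subperm_cons x).2 hsp⟩
    · exact ⟨s, hne, hsum, hsp.trans (List.sublist_cons_self x d).subperm⟩

theorem pvPick_none_iff : ∀ (d : List Int) (t : Int), pvPick d t = none ↔ ¬ pvHasSub d t := by
  intro d
  induction d with
  | nil => intro t; simp [pvPick, pvHasSub_nil]
  | cons x d ih =>
    intro t
    rw [pvPick]
    by_cases hxt : x = t
    · simp only [if_pos hxt]
      simp [pvHasSub_cons, hxt]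
    · simp only [if_neg hxt]
      cases h1 : pvPick d (t - x) with
      | some r =>
        have hhs : pvHasSub d (t - x) := by
          by_contra hc
          rw [← ih (t - x)] at hc
          rw [h1] at hc; cases hc
        simp [pvHasSub_cons, hhs]
      | none =>
        have hns : ¬ pvHasSub d (t - x) := (ih (t - x)).1 h1
        rw [ih t, pvHasSub_cons]
        constructor
        · intro h hc
          rcases hc with h' | h' | h'
          · exact hxt h'
          · exact hns h'
          · exact h h'
        · intro h hc
          exact h (Or.inr (Or.inr hc))

theorem pvPick_prune : ∀ (pre : List Int), ∀ (xs : List Int) (t : Int),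
    (∀ s : List Int, s ≠ [] → s.sum = t → s.Subperm (pre ++ xs) → ∀ y ∈ s, y ∈ xs) →
    (∀ y ∈ pre, y ∉ xs) →
    pvPick (pre ++ xs) t = pvPick xs t := by
  intro pre
  induction pre with
  | nil => intro xs t _ _; rfl
  | cons z pre' ih =>
    intro xs t hinv hdisj
    have hz_notin : z ∉ xs := hdisj z (List.mem_cons_self)
    have hzt : z ≠ t := by
      intro h
      have := hinv [z] (by simp) (by simpa using h)
        ((List.Sublist.cons₂ z (List.nil_sublist _)).subperm) z (List.mem_cons_self)
      exact hz_notin this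
    have hnone : pvPick (pre' ++ xs) (t - z) = none := by
      rw [pvPick_none_iff]
      rintro ⟨s, hne, hsum, hsp⟩
      have hzs : (z :: s).Subperm (z :: (pre' ++ xs)) := (List.subperm_cons z).2 hsp
      have := hinv (z :: s) (by simp) (by simp [hsum]) hzs z (List.mem_cons_self)
      exact hz_notin this
    rw [List.cons_append, pvPick, if_neg hzt, hnone]
    apply ih
    · intro s hne hsum hsp y hy
      exact hinv s hne hsum (hsp.trans (List.sublist_cons_self z _).subperm) y hy
    · intro y hy
      exact hdisj y (List.mem_cons_of_mem _ hy)

theorem pvCloop (t : Int) (cur : List Int) (G : Int → Option (List Int)) (D : List Int)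
    (hnd : D.Nodup)
    (hG : ∀ x ∈ D, G x = if x = t then some (cur ++ [x])
            else Option.map (fun r => cur ++ x :: r) (pvPick (D.filter (fun o => o ≠ x)) (t - x))) :
    ∀ (rest done : List Int), D = done ++ rest →
    (∀ s : List Int, s ≠ [] → s.sum = t → s.Subperm D → ∀ y ∈ s, y ∈ rest) →
    rest.findSome? G = Option.map (fun r => cur ++ r) (pvPick rest t) := by
  intro rest
  induction rest with
  | nil => intro done _ _; rfl
  | cons x rest' ih =>
    intro done hD hinv
    have hxD : x ∈ D := by rw [hD]; simp
    have hnd' : (done ++ x :: rest').Nodup := hD ▸ hnd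
    have hx_done : x ∉ done := by
      rcases List.nodup_append.1 hnd' with ⟨_, _, hdisj⟩
      intro h
      exact hdisj x h x (List.mem_cons_self) rfl
    have hx_rest : x ∉ rest' := by
      rcases List.nodup_append.1 hnd' with ⟨_, h2, _⟩
      exact (List.nodup_cons.1 h2).1
    have hdisj_done : ∀ y ∈ done, y ∉ x :: rest' := by
      rcases List.nodup_append.1 hnd' with ⟨_, _, hdisj⟩
      intro y hy hmem
      exact hdisj y hy y hmem rfl
    have hfilter : D.filter (fun o => o ≠ x) = done ++ rest' := by
      rw [hD, List.filter_append]
      congr 1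
      · apply List.filter_eq_self.2
        intro a ha
        simp only [ne_eq, decide_not, Bool.not_eq_eq_eq_not, Bool.not_true, decide_eq_false_iff_not]
        intro h; subst h; exact hx_done ha
      · simp only [List.filter_cons]
        rw [if_neg (by simp)]
        apply List.filter_eq_self.2
        intro a ha
        simp only [ne_eq, decide_not, Bool.not_eq_eq_eq_not, Bool.not_true, decide_eq_false_iff_not]
        intro h; subst h; exact hx_rest ha
    have hxnotdr : x ∉ done ++ rest' := by
      simp only [List.mem_append]
      rintro (h | h)
      · exact hx_done h
      · exact hx_rest h
    have hpermD : (x :: (done ++ rest')).Perm D := by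
      rw [hD]; exact List.perm_middle.symm
    have hE : pvPick (done ++ rest') (t - x) = pvPick rest' (t - x) := by
      apply pvPick_prune
      · intro s hne hsum hsp y hy
        have hxs_sp : (x :: s).Subperm D :=
          ((List.subperm_cons x).2 hsp).trans hpermD.subperm
        have hall := hinv (x :: s) (by simp) (by simp [hsum]) hxs_sp
        have hyx : y ≠ x := by
          intro h
          subst h
          exact hxnotdr (hsp.subset hy)
        have := hall y (List.mem_cons_of_mem _ hy)
        rcases List.mem_cons.1 this with h | h
        · exact absurd h hyx
        · exact h
      · intro y hy hmem
        exact hdisj_done y hy (List.mem_cons_of_mem _ hmem)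
    rw [List.findSome?_cons, hG x hxD, pvPick]
    by_cases hxt : x = t
    · simp [hxt]
    · rw [if_neg hxt, if_neg hxt, hfilter, hE]
      cases h2 : pvPick rest' (t - x) with
      | some r => rfl
      | none =>
        simp only [Option.map_none]
        apply ih (done ++ [x]) (by rw [hD]; simp)
        intro s hne hsum hsp y hy
        have hy_xrest : y ∈ x :: rest' := hinv s hne hsum hsp y hy
        have hx_not_s : x ∉ s := by
          intro hxs
          have hperm : s.Perm (x :: s.erase x) := List.perm_cons_erase hxs
          have herase_ne : s.erase x ≠ [] := by
            intro h
            rw [h] at hperm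
            have : s = [x] := List.perm_singleton.1 hperm
            rw [this] at hsum
            simp at hsum
            exact hxt hsum
          have hsum' : (s.erase x).sum = t - x := by
            have := hperm.sum_eq
            simp at this
            omega
          have herase_sp : (s.erase x).Subperm rest' := by
            rw [List.subperm_ext_iff]
            intro a ha
            have ha_s : a ∈ s := List.mem_of_mem_erase ha
            have hax : a ≠ x := by
              intro h
              subst h
              have h1 : List.count a (s.erase a) = List.count a s - 1 := List.count_erase_self
              have h2 : List.count a s ≤ List.count a D := List.subperm_ext_iff.1 hsp a ha_s
              have h3 : List.count a D ≤ 1 := List.nodup_iff_count_le_one.1 hnd a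
              have h4 : 0 < List.count a (s.erase a) := List.count_pos_iff.2 ha
              omega
            have ha_rest : a ∈ rest' := by
              rcases List.mem_cons.1 (hinv s hne hsum hsp a ha_s) with h | h
              · exact absurd h hax
              · exact h
            have hle : List.count a (s.erase x) ≤ List.count a s := (List.erase_sublist).count_le a
            have h2 : List.count a s ≤ List.count a D := List.subperm_ext_iff.1 hsp a ha_s
            have h3 : List.count a D ≤ 1 := List.nodup_iff_count_le_one.1 hnd a
            have h5 : 0 < List.count a rest' := List.count_pos_iff.2 ha_rest
            omega
          have : pvHasSub rest' (t - x) := ⟨s.erase x, herase_ne, hsum', herase_sp⟩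
          exact (pvPick_none_iff rest' (t - x)).1 h2 this
        have hyx : y ≠ x := fun h => hx_not_s (h ▸ hy)
        rcases List.mem_cons.1 hy_xrest with h | h
        · exact absurd h hyx
        · exact h

theorem pvCore (t : Int) (cur : List Int) (G : Int → Option (List Int)) (D : List Int)
    (hnd : D.Nodup)
    (hG : ∀ x ∈ D, G x = if x = t then some (cur ++ [x])
            else Option.map (fun r => cur ++ x :: r) (pvPick (D.filter (fun o => o ≠ x)) (t - x))) :
    D.findSome? G = Option.map (fun r => cur ++ r) (pvPick D t) := by
  apply pvCloop t cur G D hnd hG D [] rfl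
  intro s _ _ hsp y hy
  exact hsp.subset hy

theorem pvFindSome?_attach {β : Type} (l : List Int) (f : Int → Option β) :
    l.attach.findSome? (fun x => f x.val) = l.findSome? f := by
  conv_rhs => rw [← List.attach_map_subtype_val l, List.findSome?_map]
  rfl

theorem pvMainEq : ∀ (n : Nat) (avail : List Int), avail.length ≤ n →
    ∀ (cur : List Int) (goal : Int),
    get_sum_sublist cur avail goal
      = Option.map (fun r => cur ++ r) (pvPick (pvDedupF avail) (goal - cur.sum)) := by
  intro n
  induction n with
  | zero =>
    intro avail hlen cur goal
    have : avail = [] := List.length_eq_zero_iff.1 (Nat.le_zero.1 hlen)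
    subst this
    rw [get_sum_sublist]
    simp [pvDedupF, pvPick]
  | succ n ih =>
    intro avail hlen cur goal
    have h1 : get_sum_sublist cur avail goal
        = avail.findSome? (fun v =>
            if (cur ++ [v]).sum = goal then some (cur ++ [v])
            else get_sum_sublist (cur ++ [v]) (avail.filter (fun o => o ≠ v)) goal) := by
      rw [get_sum_sublist]
      exact pvFindSome?_attach avail (fun v =>
        if (cur ++ [v]).sum = goal then some (cur ++ [v])
        else get_sum_sublist (cur ++ [v]) (avail.filter (fun o => o ≠ v)) goal)
    rw [h1]
    set t := goal - cur.sum with ht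
    have hstep : avail.findSome?
        (fun v => if (cur ++ [v]).sum = goal then some (cur ++ [v])
          else get_sum_sublist (cur ++ [v]) (avail.filter (fun o => o ≠ v)) goal)
        = avail.findSome?
        (fun v => if v = t then some (cur ++ [v])
          else Option.map (fun r => cur ++ v :: r) (pvPick (pvDedupF (avail.filter (fun o => o ≠ v))) (t - v))) := by
      apply pvFindSome?_congr
      intro v hv
      have hsum : (cur ++ [v]).sum = cur.sum + v := by simp
      have hcond : ((cur ++ [v]).sum = goal) ↔ (v = t) := by rw [hsum, ht]; omega
      by_cases hc : v = t
      · rw [if_pos (hcond.2 hc), if_pos hc]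
      · rw [if_neg (fun h => hc (hcond.1 h)), if_neg hc]
        have hlt : (avail.filter (fun o => o ≠ v)).length ≤ n :=
          Nat.lt_succ_iff.1 (Nat.lt_of_lt_of_le (pvFilterNeLtLen avail v hv) hlen)
        rw [ih _ hlt]
        have harg : goal - (cur ++ [v]).sum = t - v := by rw [hsum, ht]; omega
        rw [harg]
        congr 1
        funext r
        simp
    rw [hstep, ← pvFindSome?_dedup]
    apply pvCore t cur _ (pvDedupF avail) (pvDedupF_nodup avail)
    intro x _
    by_cases hc : x = t
    · rw [if_pos hc, if_pos hc]
    · rw [if_neg hc, if_neg hc, pvDedupF_filter]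

-- ===== VERDICT (by name: the statement is the Claim_ definition above) =====
theorem get_sum_sublist_spec : Claim_equal_get_sum_sublist := by
  intro cur avail goal _
  unfold Spec_get_sum_sublist get_sum_sublist_alt
  rw [pvDistinct_eq, pvMainEq avail.length avail (Nat.le_refl _) cur goal]
  cases pvPick (pvDedupF avail) (goal - cur.sum) <;> rfl
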